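-- pv_equiv track=rewrite | github.com/Grsvk211/Pythoncode_1 | src/BusinessLogic.py | findFEPSWithSameRequirements
-- ===== SOURCE A (Python) =====
-- def findFEPSWithSameRequirements(rqIDs):
--     # An empty dictionary to store the result
--     result = {}
--     # A dictionary to keep track of which FEPS contain each requirement
--     req_to_feps = {}
--
--     # Loop through the outer dictionary
--     for key, value in rqIDs.items():
--         # Loop through the inner dictionary (which may contain 'New Requirements' key)
--         for subkey, subvalue in value.items():
--             if (subkey == 'New Requirements ') or (subkey == 'Evolved Requirements') or (subkey == 'Interfaces'):
--                 # Loop through the list of requirements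
--                 for req in subvalue:
--                     # Add the current FEPS key to the list of FEPS containing this requirement
--                     req_to_feps.setdefault(req, []).append(key)
--
--     # Iterate through the requirements and find FEPS with the same requirements
--     for req, feps_list in req_to_feps.items():
--         if len(feps_list) > 1:
--             # If more than one FEPS contains this requirement, add it to the result
--             result[req] = feps_list
--
--     return result
-- ===== SOURCE B (Python) =====
-- def findFEPSWithSameRequirements(rqIDs):
--     # Flatten to (req, key) pairs, then group by repeated filtering on the
--     # first not-yet-handled requirement (no accumulation dict at all):
--     # first-occurrence order and key order are preserved by the filters.
--     wanted = ('New Requirements ', 'Evolved Requirements', 'Interfaces')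
--     pairs = [(req, key)
--              for key, value in rqIDs.items()
--              for subkey, subvalue in value.items() if subkey in wanted
--              for req in subvalue]
--     result = {}
--     rest = pairs
--     while rest:
--         r = rest[0][0]
--         keys = [k for (q, k) in rest if q == r]
--         if len(keys) > 1:
--             result[r] = keys
--         rest = [(q, k) for (q, k) in rest if q != r]
--     return result
-- ===== Notes on version B (the rewrite author's own statement) =====
-- stated objective: alternative
-- what changed: B drops A's hash accumulation (setdefault dict-of-lists then length filter) entirely: it flattens to (req,key) pairs and groups them by repeated filtering on the first unprocessed requirement, emitting each group of size > 1 directly.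
import Mathlib
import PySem

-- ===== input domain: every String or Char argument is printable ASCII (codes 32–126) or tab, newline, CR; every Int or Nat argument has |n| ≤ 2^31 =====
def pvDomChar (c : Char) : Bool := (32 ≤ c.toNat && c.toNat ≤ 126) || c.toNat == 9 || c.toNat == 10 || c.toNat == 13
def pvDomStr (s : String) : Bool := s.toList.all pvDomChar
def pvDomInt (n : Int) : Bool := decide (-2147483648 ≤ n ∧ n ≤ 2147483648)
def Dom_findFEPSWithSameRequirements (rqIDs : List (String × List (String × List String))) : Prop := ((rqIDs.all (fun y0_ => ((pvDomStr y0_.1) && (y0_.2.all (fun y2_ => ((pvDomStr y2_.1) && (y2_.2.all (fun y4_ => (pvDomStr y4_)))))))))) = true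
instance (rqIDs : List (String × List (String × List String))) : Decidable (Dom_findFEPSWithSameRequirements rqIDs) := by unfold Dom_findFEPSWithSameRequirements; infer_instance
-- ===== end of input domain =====

-- B replaces A's setdefault dict-of-lists accumulation with grouping by repeated
-- filtering of a flat (req, key) pair list; return values proved equal on all inputs.

-- ===== PORT A =====

-- exact model of `d.setdefault(r, []).append(k)` on a Python dict
-- (first-match key, value updated in place, new key appended at the end)
def pvSD (d : List (String × List String)) (r k : String) : List (String × List String) :=
  match d with
  | [] => [(r, [k])]
  | (r', l) :: t => if r' = r then (r', l ++ [k]) :: t else (r', l) :: pvSD t r k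

-- exact model of `result[req] = feps_list` (overwrite in place, else append at end)
def pvIns (d : List (String × List String)) (r : String) (v : List String) : List (String × List String) :=
  match d with
  | [] => [(r, v)]
  | (r', l) :: t => if r' = r then (r', v) :: t else (r', l) :: pvIns t r v

def pvWantedKey (s : String) : Bool :=
  s == "New Requirements " || s == "Evolved Requirements" || s == "Interfaces"

def findFEPSWithSameRequirements (rqIDs : List (String × List (String × List String))) : List (String × List String) :=
  let req_to_feps : List (String × List String) :=
    rqIDs.foldl (fun d kv =>
      kv.2.foldl (fun d2 sv =>
        if pvWantedKey sv.1 then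
          sv.2.foldl (fun d3 req => pvSD d3 req kv.1) d2
        else d2) d) []
  req_to_feps.foldl (fun res e => if e.2.length > 1 then pvIns res e.1 e.2 else res) []

-- ===== PORT B =====

-- the while loop of Source B; the head of `rest` is split off the two filters so that the
-- recursion is structurally decreasing — the filters compute exactly Source B's
-- `[k for (q,k) in rest if q == r]` and `[(q,k) for (q,k) in rest if q != r]`
def pvLoop : List (String × String) → List (String × List String)
  | [] => []
  | (r, k) :: t =>
      let keys := k :: (t.filter (fun p => p.1 == r)).map Prod.snd
      let out := pvLoop (t.filter (fun p => p.1 != r))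
      if keys.length > 1 then (r, keys) :: out else out
termination_by ps => ps.length
decreasing_by
  simp only [List.length_cons, List.length_unattach]
  exact Nat.lt_succ_of_le (le_trans (List.length_filter_le _ _) (by simp))

def findFEPSWithSameRequirements_alt (rqIDs : List (String × List (String × List String))) : List (String × List String) :=
  let pairs : List (String × String) :=
    rqIDs.flatMap (fun kv =>
      kv.2.flatMap (fun sv =>
        if pvWantedKey sv.1 then sv.2.map (fun req => (req, kv.1)) else []))
  pvLoop pairs

-- ===== PRECONDITION & SPEC =====
def Spec_findFEPSWithSameRequirements (rqIDs : List (String × List (String × List String))) (out : List (String × List String)) : Prop := out = findFEPSWithSameRequirements_alt rqIDs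
instance (rqIDs : List (String × List (String × List String))) (out : List (String × List String)) : Decidable (Spec_findFEPSWithSameRequirements rqIDs out) := by unfold Spec_findFEPSWithSameRequirements; infer_instance

-- ===== CLAIM (what is proved, stated in full; the proofs are below) =====
def Claim_equal_findFEPSWithSameRequirements : Prop := ∀ (rqIDs : List (String × List (String × List String))), Dom_findFEPSWithSameRequirements rqIDs → Spec_findFEPSWithSameRequirements rqIDs (findFEPSWithSameRequirements rqIDs)

-- ===== LEMMAS AND PROOFS =====

-- fold pvSD over a flat list of (req, key) pairs
def pvG (acc : List (String × List String)) (ps : List (String × String)) : List (String × List String) :=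
  ps.foldl (fun d p => pvSD d p.1 p.2) acc

def pvPairs (rqIDs : List (String × List (String × List String))) : List (String × String) :=
  rqIDs.flatMap (fun kv =>
    kv.2.flatMap (fun sv =>
      if pvWantedKey sv.1 then sv.2.map (fun req => (req, kv.1)) else []))

-- grouping without the size filter: pvLoop's skeleton
def pvGrp : List (String × String) → List (String × List String)
  | [] => []
  | (r, k) :: t =>
      (r, k :: (t.filter (fun p => p.1 == r)).map Prod.snd)
        :: pvGrp (t.filter (fun p => p.1 != r))
termination_by ps => ps.length
decreasing_by
  simp only [List.length_cons, List.length_unattach]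
  exact Nat.lt_succ_of_le (le_trans (List.length_filter_le _ _) (by simp))

-- extend each existing group of acc by its matches in ps
def pvExtend (acc : List (String × List String)) (ps : List (String × String)) : List (String × List String) :=
  acc.map (fun e => (e.1, e.2 ++ (ps.filter (fun p => p.1 == e.1)).map Prod.snd))

theorem pvA_phase1 (rqIDs : List (String × List (String × List String)))
    (acc : List (String × List String)) :
    rqIDs.foldl (fun d kv =>
      kv.2.foldl (fun d2 sv =>
        if pvWantedKey sv.1 then sv.2.foldl (fun d3 req => pvSD d3 req kv.1) d2 else d2) d) acc
      = pvG acc (pvPairs rqIDs) := by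
  unfold pvG pvPairs
  rw [List.foldl_flatMap]
  congr 1
  funext d kv
  rw [List.foldl_flatMap]
  congr 1
  funext d2 sv
  by_cases h : pvWantedKey sv.1
  · simp [h, List.foldl_map]
  · simp [h]

theorem pvSD_keys_mem (d : List (String × List String)) (r k : String)
    (h : r ∈ d.map Prod.fst) : (pvSD d r k).map Prod.fst = d.map Prod.fst := by
  induction d with
  | nil => simp at h
  | cons e t ih =>
    obtain ⟨r0, l0⟩ := e
    by_cases h0 : r0 = r
    · simp [pvSD, h0]
    · rw [List.map_cons, List.mem_cons] at h
      rcases h with h | h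
      · exact absurd h.symm h0
      · simp [pvSD, h0, ih h]

theorem pvSD_keys_not_mem (d : List (String × List String)) (r k : String)
    (h : r ∉ d.map Prod.fst) : pvSD d r k = d ++ [(r, [k])] := by
  induction d with
  | nil => simp [pvSD]
  | cons e t ih =>
    obtain ⟨r0, l0⟩ := e
    rw [List.map_cons, List.mem_cons, not_or] at h
    have h1 : ¬ r0 = r := fun h' => h.1 h'.symm
    simp [pvSD, h1, ih h.2]

theorem pvG_nodup (ps : List (String × String)) (acc : List (String × List String))
    (h : (acc.map Prod.fst).Nodup) : ((pvG acc ps).map Prod.fst).Nodup := by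
  induction ps generalizing acc with
  | nil => exact h
  | cons p t ih =>
    show (((pvG (pvSD acc p.1 p.2) t).map Prod.fst)).Nodup
    apply ih
    by_cases hm : p.1 ∈ acc.map Prod.fst
    · rw [pvSD_keys_mem _ _ _ hm]; exact h
    · rw [pvSD_keys_not_mem _ _ _ hm]
      simp only [List.map_append, List.map_cons, List.map_nil]
      refine List.Nodup.append h (List.nodup_singleton _) ?_
      intro a ha hb
      rw [List.mem_singleton] at hb
      subst hb; exact hm ha

-- pvSD on a dict already holding r appends k to r's group, pointwise
theorem pvSD_mem_map (d : List (String × List String)) (r k : String)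
    (hn : (d.map Prod.fst).Nodup) (h : r ∈ d.map Prod.fst) :
    pvSD d r k = d.map (fun e => if e.1 = r then (e.1, e.2 ++ [k]) else e) := by
  induction d with
  | nil => simp at h
  | cons e t ih =>
    obtain ⟨r0, l0⟩ := e
    rw [List.map_cons, List.nodup_cons] at hn
    by_cases h0 : r0 = r
    · subst h0
      have : ∀ e ∈ t, (fun e : String × List String => if e.1 = r0 then (e.1, e.2 ++ [k]) else e) e = e := by
        intro e he
        have : e.1 ≠ r0 := by
          intro hx; exact hn.1 (List.mem_map.mpr ⟨e, he, hx⟩)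
        simp [this]
      simp [pvSD, List.map_congr_left this]
    · rw [List.map_cons, List.mem_cons] at h
      rcases h with h | h
      · exact absurd h.symm h0
      · simp [pvSD, h0, ih hn.2 h]

-- the central invariant: folding pvSD equals extending the existing groups and
-- grouping the fresh pairs
theorem pvG_char (ps : List (String × String)) (acc : List (String × List String))
    (hn : (acc.map Prod.fst).Nodup) :
    pvG acc ps = pvExtend acc ps
      ++ pvGrp (ps.filter (fun p => !(acc.map Prod.fst).contains p.1)) := by
  induction ps generalizing acc with
  | nil => simp [pvG, pvExtend, pvGrp]
  | cons p t ih =>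
    obtain ⟨r, k⟩ := p
    show pvG (pvSD acc r k) t = _
    by_cases hm : r ∈ acc.map Prod.fst
    · have hn' : ((pvSD acc r k).map Prod.fst).Nodup := by
        rw [pvSD_keys_mem _ _ _ hm]; exact hn
      rw [ih _ hn', pvSD_keys_mem _ _ _ hm]
      have hfilter : (List.filter (fun p => !(acc.map Prod.fst).contains p.1) ((r, k) :: t))
          = t.filter (fun p => !(acc.map Prod.fst).contains p.1) := by
        simp [List.filter, hm]
      rw [hfilter]
      congr 1
      rw [pvSD_mem_map acc r k hn hm]
      unfold pvExtend
      rw [List.map_map]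
      apply List.map_congr_left
      intro e _
      by_cases he : e.1 = r
      · simp [Function.comp, he, List.filter]
      · have hbe : (r == e.1) = false := by simpa using fun hx => he hx.symm
        simp [Function.comp, he, hbe, List.filter]
    · have hkeys : (pvSD acc r k).map Prod.fst = acc.map Prod.fst ++ [r] := by
        rw [pvSD_keys_not_mem _ _ _ hm]; simp
      have hn' : ((pvSD acc r k).map Prod.fst).Nodup := by
        rw [hkeys]
        refine List.Nodup.append hn (List.nodup_singleton _) ?_
        intro a ha hb
        rw [List.mem_singleton] at hb; subst hb; exact hm ha
      rw [ih _ hn', pvSD_keys_not_mem _ _ _ hm]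
      -- extend side
      have hext : pvExtend (acc ++ [(r, [k])]) t
          = pvExtend acc t ++ [(r, [k] ++ (t.filter (fun p => p.1 == r)).map Prod.snd)] := by
        unfold pvExtend; simp
      have hextc : pvExtend acc ((r, k) :: t) = pvExtend acc t := by
        unfold pvExtend
        apply List.map_congr_left
        intro e he
        have her : ¬ (r == e.1) = true := by
          simp only [beq_iff_eq]
          intro hx; subst hx; exact hm (List.mem_map.mpr ⟨e, he, rfl⟩)
        simp [List.filter, her]
      -- fresh side
      have hfc : (List.filter (fun p => !(acc.map Prod.fst).contains p.1) ((r, k) :: t))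
          = (r, k) :: t.filter (fun p => !(acc.map Prod.fst).contains p.1) := by
        simp [List.filter, hm]
      have hgrp : pvGrp ((r, k) :: t.filter (fun p => !(acc.map Prod.fst).contains p.1))
          = (r, k :: ((t.filter (fun p => !(acc.map Prod.fst).contains p.1)).filter
                (fun p => p.1 == r)).map Prod.snd)
            :: pvGrp ((t.filter (fun p => !(acc.map Prod.fst).contains p.1)).filter
                (fun p => p.1 != r)) := by
        rw [pvGrp]
      have hff1 : (t.filter (fun p => !(acc.map Prod.fst).contains p.1)).filter
            (fun p => p.1 == r) = t.filter (fun p => p.1 == r) := by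
        rw [List.filter_filter]
        apply List.filter_congr
        intro p _
        by_cases hp : (p.1 == r) = true
        · have : p.1 = r := by simpa using hp
          subst this
          simp [hm]
        · simp [hp]
      have hff2 : (t.filter (fun p => !(acc.map Prod.fst).contains p.1)).filter
            (fun p => p.1 != r)
          = t.filter (fun p => !((acc.map Prod.fst).contains p.1 || p.1 == r)) := by
        rw [List.filter_filter]
        apply List.filter_congr
        intro p _
        by_cases h2 : p.1 = r <;>
          cases h1 : (acc.map Prod.fst).contains p.1 <;> simp [h2, bne]
      have hkeyfresh : t.filter (fun p => !(((acc ++ [(r, [k])]).map Prod.fst).contains p.1))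
          = t.filter (fun p => !((acc.map Prod.fst).contains p.1 || p.1 == r)) := by
        apply List.filter_congr
        intro p _
        by_cases hp : p.1 = r
        · subst hp; simp
        · have hb : (p.1 == r) = false := by simpa using hp
          simp [List.mem_append, hp, hb]
      rw [hext, hextc, hfc, hgrp, hff1, hff2, hkeyfresh]
      simp

theorem pvG_nil_eq_grp (ps : List (String × String)) : pvG [] ps = pvGrp ps := by
  have := pvG_char ps [] (by simp)
  simpa [pvExtend, List.filter_true] using this

theorem pvLoop_aux : ∀ (n : Nat) (ps : List (String × String)), ps.length ≤ n →
    pvLoop ps = (pvGrp ps).filter (fun e => decide (e.2.length > 1)) := by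
  intro n
  induction n with
  | zero =>
    intro ps hps
    have h0 : ps = [] := List.eq_nil_of_length_eq_zero (Nat.le_zero.mp hps)
    subst h0
    simp [pvLoop, pvGrp]
  | succ n ih =>
    intro ps hps
    match ps with
    | [] => simp [pvLoop, pvGrp]
    | (r, k) :: t =>
      rw [pvLoop, pvGrp, List.filter_cons,
        ih (t.filter (fun p => p.1 != r))
          (le_trans (List.length_filter_le _ _) (Nat.le_of_succ_le_succ hps))]
      simp only [decide_eq_true_eq]

theorem pvLoop_eq_filter_grp (ps : List (String × String)) :
    pvLoop ps = (pvGrp ps).filter (fun e => decide (e.2.length > 1)) :=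
  pvLoop_aux ps.length ps le_rfl

theorem pvIns_fresh (acc : List (String × List String)) (r : String) (v : List String)
    (h : r ∉ acc.map Prod.fst) : pvIns acc r v = acc ++ [(r, v)] := by
  induction acc with
  | nil => simp [pvIns]
  | cons e t ih =>
    obtain ⟨r0, l0⟩ := e
    rw [List.map_cons, List.mem_cons, not_or] at h
    have h1 : ¬ r0 = r := fun h' => h.1 h'.symm
    simp [pvIns, h1, ih h.2]

theorem pvA_phase2 (d : List (String × List String)) (acc : List (String × List String))
    (hn : (d.map Prod.fst).Nodup) (hf : ∀ r ∈ d.map Prod.fst, r ∉ acc.map Prod.fst) :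
    d.foldl (fun res e => if e.2.length > 1 then pvIns res e.1 e.2 else res) acc
      = acc ++ d.filter (fun e => decide (e.2.length > 1)) := by
  induction d generalizing acc with
  | nil => simp
  | cons e t ih =>
    obtain ⟨r, l⟩ := e
    rw [List.map_cons, List.nodup_cons] at hn
    by_cases hl : l.length > 1
    · have hfr : r ∉ acc.map Prod.fst := hf r (by simp)
      simp only [List.foldl_cons, if_pos hl, pvIns_fresh acc r l hfr]
      rw [ih (acc ++ [(r, l)]) hn.2 (by
        intro r' hr'
        rw [List.map_append, List.mem_append, not_or]
        refine ⟨hf r' (by rw [List.map_cons, List.mem_cons]; exact Or.inr hr'), ?_⟩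
        simp only [List.map_cons, List.map_nil, List.mem_singleton]
        intro he; subst he; exact hn.1 hr')]
      simp [List.filter, hl]
    · simp only [List.foldl_cons, if_neg hl]
      rw [ih acc hn.2 (fun r' hr' => hf r' (by rw [List.map_cons, List.mem_cons]; exact Or.inr hr'))]
      simp [List.filter, hl]

-- ===== VERDICT (by name: the statement is the Claim_ definition above) =====
theorem findFEPSWithSameRequirements_spec : Claim_equal_findFEPSWithSameRequirements := by
  intro rqIDs _
  unfold Spec_findFEPSWithSameRequirements findFEPSWithSameRequirements findFEPSWithSameRequirements_alt
  simp only []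
  rw [pvA_phase1 rqIDs []]
  have hnodup : ((pvG [] (pvPairs rqIDs)).map Prod.fst).Nodup := pvG_nodup _ [] (by simp)
  rw [pvA_phase2 (pvG [] (pvPairs rqIDs)) [] hnodup (by simp)]
  rw [pvG_nil_eq_grp, ← pvLoop_eq_filter_grp]
  rfl
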